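-- pv_equiv track=rewrite | github.com/Kno1889/Leetcode | 2306. Naming a Company.py | distinctNames
-- ===== SOURCE A (Python) =====
-- from typing import List
--
-- def distinctNames(ideas: List[str]) -> int:
--     valid_names = 0
--
--     for idea_a in ideas:
--
--         for idea_b in ideas:
--             if not idea_a is idea_b:
--                 if idea_a[0] == idea_b[0]:
--                     continue
--
--                 conc_1 = idea_a[0] + idea_b[1:]
--                 conc_2 = idea_b[0] + idea_a[1:]
--
--                 if conc_1 in ideas or conc_2 in ideas:
--                     continue
--                 else:
--                     valid_names += 1
--
--     return valid_names
-- ===== SOURCE B (Python) =====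
-- from typing import List
--
-- def distinctNames(ideas: List[str]) -> int:
--     # Group the suffixes by first letter, then count per ordered pair of
--     # distinct first letters; no pair-of-ideas double loop.
--     suffixes = {}                       # first letter -> set of suffixes
--     for s in ideas:
--         suffixes.setdefault(s[0], set()).add(s[1:])
--     letters = list(suffixes)
--
--     def m(c, d):
--         sd = suffixes[d]
--         return sum(1 for s in ideas if s[0] == c and s[1:] not in sd)
--
--     return sum(m(c, d) * m(d, c) for c in letters for d in letters if c != d)
-- ===== Notes on version B (the rewrite author's own statement) =====
-- stated objective: faster
-- what changed: Instead of A's double loop over all ordered pairs of ideas with O(n) list-membership tests for each candidate swap, B groups the suffixes by first letter into per-letter sets once and, for each ordered pair of distinct first letters (c,d), multiplies the count of ideas starting with c whose suffix is absent from d's group by the symmetric count, summing the products.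
-- outside the precondition, e.g. on distinctNames(['']): A returns 0, B raises IndexError
import Mathlib
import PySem

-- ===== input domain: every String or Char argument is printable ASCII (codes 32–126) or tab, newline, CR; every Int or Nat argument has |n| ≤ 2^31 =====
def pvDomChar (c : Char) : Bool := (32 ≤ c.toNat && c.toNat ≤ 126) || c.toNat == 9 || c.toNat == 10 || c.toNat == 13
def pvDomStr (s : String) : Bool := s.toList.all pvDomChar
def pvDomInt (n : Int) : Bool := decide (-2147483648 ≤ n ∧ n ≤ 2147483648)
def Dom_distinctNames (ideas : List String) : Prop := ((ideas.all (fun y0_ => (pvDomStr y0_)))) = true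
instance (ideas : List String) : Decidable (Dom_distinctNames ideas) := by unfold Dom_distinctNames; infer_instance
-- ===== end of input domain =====

-- B replaces A's all-ordered-pairs double loop (with O(n) membership scans) by grouping
-- suffixes into per-first-letter sets and combining per-letter counts: faster (asymptotic).

-- ===== PORT A =====
def distinctNames (ideas : List String) : Int :=
  (PySem.List.enumerate ideas 0).foldl (fun validNames ia =>
    (PySem.List.enumerate ideas 0).foldl (fun acc jb =>
      -- 'if not idea_a is idea_b': identity is ported as position inequality — a distinct
      -- object equal to idea_a is skipped by the next (first-letter) test either way, so on
      -- Pre_ (no empty string) this is exact.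
      if ia.1 = jb.1 then acc
      else
        let a0 : Char := (PySem.Str.pyGet? ia.2 0).getD ' '   -- idea_a[0]; none (IndexError on "") excluded by Pre_
        let b0 : Char := (PySem.Str.pyGet? jb.2 0).getD ' '
        if a0 = b0 then acc
        else
          let conc1 : String := String.ofList (a0 :: (PySem.Str.slice jb.2 (some 1) none).toList)  -- idea_a[0] + idea_b[1:]
          let conc2 : String := String.ofList (b0 :: (PySem.Str.slice ia.2 (some 1) none).toList)  -- idea_b[0] + idea_a[1:]
          if conc1 ∈ ideas ∨ conc2 ∈ ideas then acc
          else acc + 1) validNames) 0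

-- ===== PORT B =====
def pvFirst (s : String) : Char := (PySem.Str.pyGet? s 0).getD ' '   -- s[0]; none (IndexError on "") excluded by Pre_
def pvSuffix (s : String) : String := PySem.Str.slice s (some 1) none -- s[1:]

def distinctNames_alt (ideas : List String) : Int :=
  let suffixes : PySem.Dict Char (PySem.Set String) :=
    ideas.foldl (fun d s => d.modify (pvFirst s) PySem.Set.empty (fun g => g.add (pvSuffix s))) PySem.Dict.empty
  let letters : List Char := suffixes.keys
  let m : Char → Char → Int := fun c d =>
    let sd := suffixes.getD d PySem.Set.empty
    ideas.foldl (fun acc s => acc + if pvFirst s = c ∧ PySem.Set.contains sd (pvSuffix s) = false then 1 else 0) 0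
  letters.foldl (fun acc c => acc + letters.foldl (fun acc2 d => acc2 + if c ≠ d then m c d * m d c else 0) 0) 0

-- ===== PRECONDITION & SPEC =====
-- Pre_ excludes lists containing the empty string: there A raises IndexError ( ''[0] ) as
-- soon as '' is paired with a distinct idea, its return on the remaining such lists (e.g.
-- ['']) depends on CPython object identity, and B raises IndexError on all of them.
def Pre_distinctNames (ideas : List String) : Prop := "" ∉ ideas
instance (ideas : List String) : Decidable (Pre_distinctNames ideas) := by unfold Pre_distinctNames; infer_instance
def pvWitness_distinctNames : List String := ["coffee", "donuts", "time", "toffee"]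
def Spec_distinctNames (ideas : List String) (out : Int) : Prop := out = distinctNames_alt ideas
instance (ideas : List String) (out : Int) : Decidable (Spec_distinctNames ideas out) := by unfold Spec_distinctNames; infer_instance

-- ===== CLAIM (what is proved, stated in full; the proofs are below) =====
def Claim_equal_distinctNames : Prop := ∀ (ideas : List String), Dom_distinctNames ideas → Pre_distinctNames ideas → Spec_distinctNames ideas (distinctNames ideas)

-- ===== LEMMAS AND PROOFS =====

-- g ideas c t: some idea starts with letter c and has suffix t
def pvG (ideas : List String) (c : Char) (t : String) : Bool :=
  ideas.any (fun s => pvFirst s == c && pvSuffix s == t)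

-- the condition A tests for an (unordered-position) pair of ideas, as a 0/1 value
def pvPhi (ideas : List String) (a b : String) : Int :=
  if pvFirst a ≠ pvFirst b ∧ pvG ideas (pvFirst a) (pvSuffix b) = false
       ∧ pvG ideas (pvFirst b) (pvSuffix a) = false then 1 else 0

def pvN (ideas : List String) : Int :=
  (ideas.map (fun a => (ideas.map (fun b => pvPhi ideas a b)).sum)).sum

def pvM (ideas : List String) (c d : Char) : Int :=
  (ideas.map (fun s => if pvFirst s = c ∧ pvG ideas d (pvSuffix s) = false then (1 : Int) else 0)).sum

-- ---- string decomposition facts ----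
lemma pv_str_ext (a b : String) (h : a.toList = b.toList) : a = b :=
  String.toList_inj.mp h

lemma pv_suffix_toList (s : String) : (pvSuffix s).toList = s.toList.tail := by
  simp [pvSuffix, PySem.Str.toList_slice, PySem.Chars.slice_eq_listSlice, PySem.List.slice_from_one]

lemma pv_first_mk (c : Char) (l : List Char) : pvFirst (String.ofList (c :: l)) = c := by
  simp [pvFirst, PySem.Str.pyGet?_eq, PySem.Chars.pyGet?_eq_listPyGet?, PySem.List.pyGet?_zero_cons]

lemma pv_suffix_mk (c : Char) (l : List Char) : pvSuffix (String.ofList (c :: l)) = String.ofList l := by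
  apply pv_str_ext
  simp [pv_suffix_toList]

lemma pv_toList_ne_nil (s : String) (h : s ≠ "") : s.toList ≠ [] := by
  intro hn
  exact h (pv_str_ext s "" (by simpa using hn))

lemma pv_decomp (s : String) (h : s ≠ "") : String.ofList (pvFirst s :: (pvSuffix s).toList) = s := by
  apply pv_str_ext
  obtain ⟨c, l, hl⟩ := List.exists_cons_of_ne_nil (pv_toList_ne_nil s h)
  have hs : s = String.ofList (c :: l) := pv_str_ext _ _ (by simp [hl])
  rw [hs, pv_first_mk, pv_suffix_mk]
  simp

lemma pv_mem_iff (ideas : List String) (hpre : "" ∉ ideas) (c : Char) (t : String) :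
    (String.ofList (c :: t.toList) ∈ ideas) ↔ pvG ideas c t = true := by
  unfold pvG
  rw [List.any_eq_true]
  constructor
  · intro hm
    refine ⟨_, hm, ?_⟩
    simp [pv_first_mk, pv_suffix_mk, pv_str_ext (pvSuffix (String.ofList (c :: t.toList))) t (by simp [pv_suffix_toList])]
  · rintro ⟨s, hs, hcond⟩
    simp only [Bool.and_eq_true, beq_iff_eq] at hcond
    have hne : s ≠ "" := fun e => hpre (e ▸ hs)
    have := pv_decomp s hne
    rw [hcond.1, hcond.2] at this
    rwa [this]

-- ---- A = pvN ----
-- the per-pair contribution of A's inner loop body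
def pvH (ideas : List String) (ia jb : Int × String) : Int :=
  if ia.1 = jb.1 then 0
  else if pvFirst ia.2 = pvFirst jb.2 then 0
  else if (String.ofList (pvFirst ia.2 :: (pvSuffix jb.2).toList) ∈ ideas
            ∨ String.ofList (pvFirst jb.2 :: (pvSuffix ia.2).toList) ∈ ideas) then 0
  else 1

lemma pv_A_fold (ideas : List String) :
    distinctNames ideas
      = ((PySem.List.enumerate ideas 0).map (fun ia =>
          ((PySem.List.enumerate ideas 0).map (fun jb => pvH ideas ia jb)).sum)).sum := by
  unfold distinctNames
  have hinner : ∀ ia : Int × String,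
      (fun (acc : Int) (jb : Int × String) =>
        if ia.1 = jb.1 then acc
        else
          let a0 : Char := (PySem.Str.pyGet? ia.2 0).getD ' '
          let b0 : Char := (PySem.Str.pyGet? jb.2 0).getD ' '
          if a0 = b0 then acc
          else
            let conc1 : String := String.ofList (a0 :: (PySem.Str.slice jb.2 (some 1) none).toList)
            let conc2 : String := String.ofList (b0 :: (PySem.Str.slice ia.2 (some 1) none).toList)
            if conc1 ∈ ideas ∨ conc2 ∈ ideas then acc
            else acc + 1)
      = fun acc jb => acc + pvH ideas ia jb := by
    intro ia
    funext acc jb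
    simp only [pvH, pvFirst, pvSuffix]
    split_ifs <;> omega
  have houter :
      (fun (validNames : Int) (ia : Int × String) =>
        (PySem.List.enumerate ideas 0).foldl (fun acc jb =>
          if ia.1 = jb.1 then acc
          else
            let a0 : Char := (PySem.Str.pyGet? ia.2 0).getD ' '
            let b0 : Char := (PySem.Str.pyGet? jb.2 0).getD ' '
            if a0 = b0 then acc
            else
              let conc1 : String := String.ofList (a0 :: (PySem.Str.slice jb.2 (some 1) none).toList)
              let conc2 : String := String.ofList (b0 :: (PySem.Str.slice ia.2 (some 1) none).toList)
              if conc1 ∈ ideas ∨ conc2 ∈ ideas then acc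
              else acc + 1) validNames)
      = fun validNames ia => validNames + ((PySem.List.enumerate ideas 0).map (fun jb => pvH ideas ia jb)).sum := by
    funext validNames ia
    rw [hinner ia, PySem.List.foldl_add]
  rw [houter, PySem.List.foldl_add]
  simp

lemma pv_H_phi (ideas : List String) (hpre : "" ∉ ideas)
    (ia jb : Int × String) (hia : ia ∈ PySem.List.enumerate ideas 0)
    (hjb : jb ∈ PySem.List.enumerate ideas 0) :
    pvH ideas ia jb = pvPhi ideas ia.2 jb.2 := by
  rcases (PySem.List.mem_enumerate_iff _ _ _).mp hia with ⟨k, hk, hik⟩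
  rcases (PySem.List.mem_enumerate_iff _ _ _).mp hjb with ⟨k', hk', hjk⟩
  unfold pvH pvPhi
  by_cases hidx : ia.1 = jb.1
  · -- same position: same string, whose first letters coincide
    have : ia.2 = jb.2 := by
      subst hik hjk
      simp only at hidx ⊢
      have : (k : Int) = k' := by omega
      have hkk : k = k' := by exact_mod_cast this
      subst hkk; rfl
    simp [hidx, this]
  · rw [if_neg hidx]
    by_cases hf : pvFirst ia.2 = pvFirst jb.2
    · simp [hf]
    · rw [if_neg hf]
      simp only [pv_mem_iff ideas hpre]
      by_cases h1 : pvG ideas (pvFirst ia.2) (pvSuffix jb.2) = true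
      · simp [h1, hf]
      · by_cases h2 : pvG ideas (pvFirst jb.2) (pvSuffix ia.2) = true
        · simp [h1, h2, hf]
        · simp [h1, h2, hf]

lemma pv_A_eq (ideas : List String) (hpre : "" ∉ ideas) : distinctNames ideas = pvN ideas := by
  rw [pv_A_fold]
  unfold pvN
  have h1 : ((PySem.List.enumerate ideas 0).map (fun ia =>
          ((PySem.List.enumerate ideas 0).map (fun jb => pvH ideas ia jb)).sum))
      = ((PySem.List.enumerate ideas 0).map (fun ia =>
          (ideas.map (fun b => pvPhi ideas ia.2 b)).sum)) := by
    apply List.map_congr_left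
    intro ia hia
    have : ((PySem.List.enumerate ideas 0).map (fun jb => pvH ideas ia jb))
        = ((PySem.List.enumerate ideas 0).map (fun jb => pvPhi ideas ia.2 jb.2)) := by
      apply List.map_congr_left
      intro jb hjb
      exact pv_H_phi ideas hpre ia jb hia hjb
    rw [this]
    have : ((PySem.List.enumerate ideas 0).map (fun jb => pvPhi ideas ia.2 jb.2))
        = (((PySem.List.enumerate ideas 0).map (fun jb => jb.2)).map (fun b => pvPhi ideas ia.2 b)) := by
      rw [List.map_map]; rfl
    rw [this, PySem.List.map_snd_enumerate]
  rw [h1]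
  have h2 : ((PySem.List.enumerate ideas 0).map (fun ia => (ideas.map (fun b => pvPhi ideas ia.2 b)).sum))
      = (((PySem.List.enumerate ideas 0).map (fun jb => jb.2)).map (fun a => (ideas.map (fun b => pvPhi ideas a b)).sum)) := by
    rw [List.map_map]; rfl
  rw [h2, PySem.List.map_snd_enumerate]

-- ---- generic Int list-sum lemmas ----
lemma pv_sum_zero {α : Type} (xs : List α) : (xs.map (fun _ => (0 : Int))).sum = 0 := by
  induction xs with
  | nil => simp
  | cons x xs ih => simp [ih]

lemma pv_sum_swap {α β : Type} (xs : List α) (ys : List β) (F : α → β → Int) :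
    (xs.map (fun x => (ys.map (fun y => F x y)).sum)).sum
      = (ys.map (fun y => (xs.map (fun x => F x y)).sum)).sum := by
  induction xs with
  | nil => simp [pv_sum_zero]
  | cons x xs ih =>
      simp only [List.map_cons, List.sum_cons, ih, PySem.List.sum_map_add_int]

lemma pv_sum_pick_zero (L : List Char) (c : Char) (hc : c ∉ L) (w : Int) :
    (L.map (fun d => if d = c then w else 0)).sum = 0 := by
  induction L with
  | nil => simp
  | cons a L ih =>
      simp only [List.mem_cons, not_or] at hc
      have : a ≠ c := fun e => hc.1 e.symm
      simp [this, ih hc.2]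

lemma pv_sum_pick (L : List Char) (hnd : L.Nodup) (c : Char) (hc : c ∈ L) (w : Int) :
    (L.map (fun d => if d = c then w else 0)).sum = w := by
  induction L with
  | nil => cases hc
  | cons a L ih =>
      rcases List.nodup_cons.mp hnd with ⟨ha, hnd'⟩
      rcases List.mem_cons.mp hc with h | h
      · subst h; simp [pv_sum_pick_zero L c ha]
      · have hac : a ≠ c := fun e => ha (e ▸ h)
        simp [hac, ih hnd' h]

lemma pv_partition (ideas : List String) (L : List Char) (hnd : L.Nodup)
    (hcov : ∀ s ∈ ideas, pvFirst s ∈ L) (w : String → Int) :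
    (ideas.map w).sum = (L.map (fun c => (ideas.map (fun s => if pvFirst s = c then w s else 0)).sum)).sum := by
  rw [pv_sum_swap L ideas (fun c s => if pvFirst s = c then w s else 0)]
  · congr 1
    apply (List.map_congr_left _).symm
    intro s hs
    have : (L.map (fun c => if pvFirst s = c then w s else 0))
         = (L.map (fun c => if c = pvFirst s then w s else 0)) := by
      apply List.map_congr_left; intro c _; simp [eq_comm]
    rw [this, pv_sum_pick L hnd (pvFirst s) (hcov s hs)]

lemma pv_sum_mul {α β : Type} (xs : List α) (ys : List β) (p : α → Int) (q : β → Int) :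
    (xs.map (fun x => (ys.map (fun y => p x * q y)).sum)).sum
      = (xs.map p).sum * (ys.map q).sum := by
  induction xs with
  | nil => simp
  | cons x xs ih =>
      simp only [List.map_cons, List.sum_cons, ih, add_mul]
      rw [List.sum_map_mul_left]

-- ---- pvN = letter-pair form ----
lemma pv_count_eq (ideas : List String) (L : List Char) (hnd : L.Nodup)
    (hcov : ∀ s ∈ ideas, pvFirst s ∈ L) :
    pvN ideas
      = (L.map (fun c => (L.map (fun d => if c ≠ d then pvM ideas c d * pvM ideas d c else 0)).sum)).sum := by
  unfold pvN
  -- partition the outer sum by first letter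
  rw [pv_partition ideas L hnd hcov (fun a => (ideas.map (fun b => pvPhi ideas a b)).sum)]
  congr 1
  apply List.map_congr_left
  intro c hc
  -- partition the inner sum (under the outer indicator) by first letter
  have step1 : (ideas.map (fun a => if pvFirst a = c then (ideas.map (fun b => pvPhi ideas a b)).sum else 0))
      = (ideas.map (fun a => (L.map (fun d => if pvFirst a = c then
          (ideas.map (fun b => if pvFirst b = d then pvPhi ideas a b else 0)).sum else 0)).sum)) := by
    apply List.map_congr_left
    intro a _
    by_cases hfa : pvFirst a = c
    · simp only [hfa, if_pos rfl]
      exact pv_partition ideas L hnd hcov (fun b => pvPhi ideas a b)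
    · simp [hfa, pv_sum_zero]
  rw [step1, pv_sum_swap ideas L]
  congr 1
  apply List.map_congr_left
  intro d hd
  -- now a fixed letter pair (c, d)
  by_cases hcd : c = d
  · subst hcd
    simp only [ne_eq, not_true_eq_false, if_false]
    have : (ideas.map (fun a => if pvFirst a = c then
        (ideas.map (fun b => if pvFirst b = c then pvPhi ideas a b else 0)).sum else 0))
        = (ideas.map (fun _ => (0:Int))) := by
      apply List.map_congr_left
      intro a _
      by_cases hfa : pvFirst a = c
      · rw [if_pos hfa]
        have : (ideas.map (fun b => if pvFirst b = c then pvPhi ideas a b else 0))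
            = (ideas.map (fun _ => (0:Int))) := by
          apply List.map_congr_left
          intro b _
          by_cases hfb : pvFirst b = c
          · rw [if_pos hfb]
            unfold pvPhi
            rw [if_neg]
            rintro ⟨hne, -, -⟩
            exact hne (hfa.trans hfb.symm)
          · rw [if_neg hfb]
        rw [this, pv_sum_zero]
      · rw [if_neg hfa]
    rw [this, pv_sum_zero]
  · rw [if_pos hcd]
    have point : (ideas.map (fun a => if pvFirst a = c then
        (ideas.map (fun b => if pvFirst b = d then pvPhi ideas a b else 0)).sum else 0))
        = (ideas.map (fun a => (ideas.map (fun b =>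
            (if pvFirst a = c ∧ pvG ideas d (pvSuffix a) = false then (1:Int) else 0)
            * (if pvFirst b = d ∧ pvG ideas c (pvSuffix b) = false then (1:Int) else 0))).sum)) := by
      apply List.map_congr_left
      intro a _
      by_cases hfa : pvFirst a = c
      · rw [if_pos hfa]
        apply congrArg
        apply List.map_congr_left
        intro b _
        by_cases hfb : pvFirst b = d
        · rw [if_pos hfb]
          unfold pvPhi
          rw [hfa, hfb]
          by_cases h1 : pvG ideas d (pvSuffix a) = false
          · by_cases h2 : pvG ideas c (pvSuffix b) = false
            · simp [hfa, hfb, h1, h2, hcd]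
            · simp [hfa, hfb, h1, h2]
          · simp [hfa, hfb, h1]
        · rw [if_neg hfb]
          have : ¬ (pvFirst b = d ∧ pvG ideas c (pvSuffix b) = false) := fun h => hfb h.1
          simp [this, pvPhi, hfb]
      · rw [if_neg hfa]
        have : ¬ (pvFirst a = c ∧ pvG ideas d (pvSuffix a) = false) := fun h => hfa h.1
        simp [this, pv_sum_zero]
    rw [point, pv_sum_mul]
    rfl

-- ---- B = letter-pair form ----
-- ---- dict/group lemmas ----
lemma pv_group_mem (l : List String) (d : PySem.Dict Char (PySem.Set String)) (c : Char) (t : String) :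
    t ∈ (l.foldl (fun d s => d.modify (pvFirst s) PySem.Set.empty (fun g => g.add (pvSuffix s))) d).getD c PySem.Set.empty
      ↔ t ∈ d.getD c PySem.Set.empty ∨ ∃ s ∈ l, pvFirst s = c ∧ pvSuffix s = t := by
  induction l generalizing d with
  | nil => simp
  | cons s l ih =>
      rw [List.foldl_cons, ih]
      by_cases hc : c = pvFirst s
      · rw [hc, PySem.Dict.getD_modify_self]
        rw [PySem.Set.mem_add]
        constructor
        · rintro (⟨h | h⟩ | h)
          · exact Or.inl h
          · exact Or.inr ⟨s, List.mem_cons_self, rfl, h.symm⟩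
          · rcases h with ⟨s', hs', h1, h2⟩
            exact Or.inr ⟨s', List.mem_cons_of_mem _ hs', h1, h2⟩
        · rintro (h | ⟨s', hs', h1, h2⟩)
          · exact Or.inl (Or.inl h)
          · rcases List.mem_cons.mp hs' with rfl | hs''
            · exact Or.inl (Or.inr h2.symm)
            · exact Or.inr ⟨s', hs'', h1, h2⟩
      · rw [PySem.Dict.getD_modify_of_ne _ _ _ hc]
        constructor
        · rintro (h | ⟨s', hs', h1, h2⟩)
          · exact Or.inl h
          · exact Or.inr ⟨s', List.mem_cons_of_mem _ hs', h1, h2⟩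
        · rintro (h | ⟨s', hs', h1, h2⟩)
          · exact Or.inl h
          · rcases List.mem_cons.mp hs' with rfl | hs''
            · exact absurd h1.symm hc
            · exact Or.inr ⟨s', hs'', h1, h2⟩

lemma pv_group_iff_G (ideas : List String) (c : Char) (t : String) :
    t ∈ (ideas.foldl (fun d s => d.modify (pvFirst s) PySem.Set.empty (fun g => g.add (pvSuffix s))) PySem.Dict.empty).getD c PySem.Set.empty
      ↔ pvG ideas c t = true := by
  rw [pv_group_mem]
  unfold pvG
  rw [List.any_eq_true]
  constructor
  · rintro (h | ⟨s, hs, h1, h2⟩)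
    · rw [PySem.Dict.getD_empty] at h
      exact absurd h (by simp [PySem.Set.empty])
    · exact ⟨s, hs, by simp [h1, h2]⟩
  · rintro ⟨s, hs, h⟩
    simp only [Bool.and_eq_true, beq_iff_eq] at h
    exact Or.inr ⟨s, hs, h.1, h.2⟩

lemma pv_keys (ideas : List String) :
    (ideas.foldl (fun d s => d.modify (pvFirst s) PySem.Set.empty (fun g => g.add (pvSuffix s))) PySem.Dict.empty).keys
      = PySem.Set.ofList (ideas.map pvFirst) := by
  rw [PySem.Dict.keys_foldl_modify_key ideas pvFirst PySem.Set.empty (fun _ s g => g.add (pvSuffix s)) PySem.Dict.empty]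
  rw [show (PySem.Dict.empty : PySem.Dict Char (PySem.Set String)).keys = [] from rfl]
  exact PySem.Set.update_nil_left _

lemma pv_m_eq (ideas : List String) (c d : Char) :
    ideas.foldl (fun acc s => acc + if pvFirst s = c ∧ PySem.Set.contains
        ((ideas.foldl (fun d s => d.modify (pvFirst s) PySem.Set.empty (fun g => g.add (pvSuffix s))) PySem.Dict.empty).getD d PySem.Set.empty)
        (pvSuffix s) = false then 1 else 0) 0
      = pvM ideas c d := by
  rw [PySem.List.foldl_add]
  unfold pvM
  have : ∀ s : String, (pvFirst s = c ∧ PySem.Set.contains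
        ((ideas.foldl (fun d s => d.modify (pvFirst s) PySem.Set.empty (fun g => g.add (pvSuffix s))) PySem.Dict.empty).getD d PySem.Set.empty)
        (pvSuffix s) = false) ↔ (pvFirst s = c ∧ pvG ideas d (pvSuffix s) = false) := by
    intro s
    have hbool : PySem.Set.contains
        ((ideas.foldl (fun d s => d.modify (pvFirst s) PySem.Set.empty (fun g => g.add (pvSuffix s))) PySem.Dict.empty).getD d PySem.Set.empty)
        (pvSuffix s) = pvG ideas d (pvSuffix s) := by
      exact Bool.eq_iff_iff.mpr ((PySem.Set.contains_iff _ _).trans (pv_group_iff_G ideas d (pvSuffix s)))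
    rw [hbool]
  simp only [this]
  simp

lemma pv_B_eq (ideas : List String) :
    distinctNames_alt ideas
      = ((PySem.Set.ofList (ideas.map pvFirst)).map (fun c =>
          ((PySem.Set.ofList (ideas.map pvFirst)).map (fun d =>
            if c ≠ d then pvM ideas c d * pvM ideas d c else 0)).sum)).sum := by
  unfold distinctNames_alt
  simp only [pv_keys, pv_m_eq]
  have hout : (fun (acc : Int) (c : Char) => acc + (PySem.Set.ofList (ideas.map pvFirst)).foldl
      (fun acc2 d => acc2 + if c ≠ d then pvM ideas c d * pvM ideas d c else 0) 0)
      = fun acc c => acc + ((PySem.Set.ofList (ideas.map pvFirst)).map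
          (fun d => if c ≠ d then pvM ideas c d * pvM ideas d c else 0)).sum := by
    funext acc c
    rw [PySem.List.foldl_add]
    omega
  rw [hout, PySem.List.foldl_add]
  simp

-- ===== VERDICT (by name: the statement is the Claim_ definition above) =====
theorem distinctNames_spec : Claim_equal_distinctNames := by
  intro ideas _hdom hpre
  unfold Spec_distinctNames
  have hL : ∀ s ∈ ideas, pvFirst s ∈ PySem.Set.ofList (ideas.map pvFirst) := by
    intro s hs
    exact (PySem.Set.mem_ofList _ _).mpr (List.mem_map_of_mem hs)
  rw [pv_A_eq ideas hpre, pv_B_eq ideas,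
    pv_count_eq ideas _ (PySem.Set.nodup_ofList _) hL]
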